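-- pv_equiv track=rewrite | github.com/zozo5085/SACR | tools/test.py | get_voc_palette
-- ===== SOURCE A (Python) =====
-- def get_voc_palette(n=256):
--     palette = [0] * (n * 3)
--     for j in range(0, n):
--         lab = j
--         palette[j * 3 + 0] = 0
--         palette[j * 3 + 1] = 0
--         palette[j * 3 + 2] = 0
--         i = 0
--         while lab:
--             palette[j * 3 + 0] |= (((lab >> 0) & 1) << (7 - i))
--             palette[j * 3 + 1] |= (((lab >> 1) & 1) << (7 - i))
--             palette[j * 3 + 2] |= (((lab >> 2) & 1) << (7 - i))
--             i += 1
--             lab >>= 3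
--     return palette
-- ===== SOURCE B (Python) =====
-- def get_voc_palette(n=256):
--     # Dynamic programming: the channel values of index j are obtained in O(1)
--     # from those of j >> 3, already stored in the tables.
--     r = [0] * n
--     g = [0] * n
--     b = [0] * n
--     for j in range(1, n):
--         q = j >> 3
--         r[j] = ((j & 1) << 7) | (r[q] >> 1)
--         g[j] = (((j >> 1) & 1) << 7) | (g[q] >> 1)
--         b[j] = (((j >> 2) & 1) << 7) | (b[q] >> 1)
--     return [c for j in range(n) for c in (r[j], g[j], b[j])]
-- ===== Notes on version B (the rewrite author's own statement) =====
-- stated objective: faster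
-- what changed: B computes the palette by dynamic programming over precomputed channel tables — each index's three channel values are derived in O(1) from the already-stored values of index j>>3 via r[j]=((j&1)<<7)|(r[j>>3]>>1) — instead of A's per-index while loop over all base-8 digits of j.
import Mathlib
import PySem

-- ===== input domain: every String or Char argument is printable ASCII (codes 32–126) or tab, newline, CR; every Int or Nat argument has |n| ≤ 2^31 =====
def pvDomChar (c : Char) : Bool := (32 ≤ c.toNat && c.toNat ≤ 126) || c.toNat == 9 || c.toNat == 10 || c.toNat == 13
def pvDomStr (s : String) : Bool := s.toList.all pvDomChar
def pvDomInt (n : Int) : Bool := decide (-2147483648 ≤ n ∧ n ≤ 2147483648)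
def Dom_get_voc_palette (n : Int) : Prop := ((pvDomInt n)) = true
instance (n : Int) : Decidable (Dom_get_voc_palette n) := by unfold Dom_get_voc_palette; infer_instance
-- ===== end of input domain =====

-- B replaces A's per-index digit loop by a dynamic program: each index's channel values come
-- in O(1) from the stored values of index j>>3 (objective: faster — measured constant factor).

-- ===== PORT A =====
-- the while-loop of A: lab = j (j ≥ 0, so lab is a Nat); indices j3+k are always in range
-- (palette is preallocated), so List.getD/List.set are exact; `<<< (7 - i)` is exact because under
-- Pre_ the loop stops before i = 8 (Python raises "negative shift count" otherwise — excluded by Pre_).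
def vocWhile (pal : List Int) (j3 lab i : Nat) : List Int :=
  if h : lab ≠ 0 then
    let p0 := pal.set (j3+0) (PySem.Int.bor (pal.getD (j3+0) 0) ((((lab >>> 0) &&& 1) <<< (7 - i) : Nat) : Int))
    let p1 := p0.set (j3+1) (PySem.Int.bor (p0.getD (j3+1) 0) ((((lab >>> 1) &&& 1) <<< (7 - i) : Nat) : Int))
    let p2 := p1.set (j3+2) (PySem.Int.bor (p1.getD (j3+2) 0) ((((lab >>> 2) &&& 1) <<< (7 - i) : Nat) : Int))
    vocWhile p2 j3 (lab >>> 3) (i + 1)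
  else pal
termination_by lab
decreasing_by
  simp only [Nat.shiftRight_eq_div_pow]
  exact Nat.div_lt_self (Nat.pos_of_ne_zero h) (by norm_num)

-- one iteration of A's `for j in range(0, n)` body (j ≥ 0, so (j*3).toNat is exact)
def vocStep (pal : List Int) (j : Int) : List Int :=
  let j3 := (j * 3).toNat
  let pal := ((pal.set (j3+0) 0).set (j3+1) 0).set (j3+2) 0
  vocWhile pal j3 j.toNat 0

def get_voc_palette (n : Int) : List Int :=
  (PySem.List.pyRange 0 n 1).foldl vocStep (List.replicate (n * 3).toNat 0)

-- ===== PORT B =====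
-- Source B's loop body for ONE channel table (`off` selects the bit: 0 for r, 1 for g, 2 for b);
-- j ≥ 1 inside range(1, n), so j.toNat is exact and j >> 3 is j.toNat >>> 3
def updC (off : Nat) (r : List Int) (j : Int) : List Int :=
  r.set j.toNat
    (PySem.Int.bor ((((j.toNat >>> off) &&& 1) <<< 7 : Nat) : Int) (r.getD (j.toNat >>> 3) 0 >>> 1))

-- the three assignments of Source B's loop body, on the state (r, g, b)
def altStep (s : List Int × List Int × List Int) (j : Int) : List Int × List Int × List Int :=
  (updC 0 s.1 j, updC 1 s.2.1 j, updC 2 s.2.2 j)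

def get_voc_palette_alt (n : Int) : List Int :=
  let init := (List.replicate n.toNat (0:Int), List.replicate n.toNat (0:Int), List.replicate n.toNat (0:Int))
  let s := (PySem.List.pyRange 1 n 1).foldl altStep init
  (PySem.List.pyRange 0 n 1).flatMap (fun j => [s.1.getD j.toNat 0, s.2.1.getD j.toNat 0, s.2.2.getD j.toNat 0])

-- ===== PRECONDITION & SPEC =====
-- A raises ValueError ("negative shift count") as soon as some j < n has j ≥ 2^24; Pre_ keeps
-- exactly the inputs on which A returns normally.
def Pre_get_voc_palette (n : Int) : Prop := n ≤ 16777216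
instance (n : Int) : Decidable (Pre_get_voc_palette n) := by unfold Pre_get_voc_palette; infer_instance
def pvWitness_get_voc_palette : Int := (256)

def Spec_get_voc_palette (n : Int) (out : List Int) : Prop := out = get_voc_palette_alt n
instance (n : Int) (out : List Int) : Decidable (Spec_get_voc_palette n out) := by unfold Spec_get_voc_palette; infer_instance

-- ===== CLAIM (what is proved, stated in full; the proofs are below) =====
def Claim_equal_get_voc_palette : Prop := ∀ (n : Int), Dom_get_voc_palette n → Pre_get_voc_palette n → Spec_get_voc_palette n (get_voc_palette n)

-- ===== LEMMAS AND PROOFS =====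

-- the common specification: channel `off` of index j, by recursion on the base-8 digits of j
def dchan (j off : Nat) : Nat :=
  if j = 0 then 0 else (((j >>> off) &&& 1) <<< 7) ||| (dchan (j >>> 3) off >>> 1)
termination_by j
decreasing_by
  simp only [Nat.shiftRight_eq_div_pow]
  exact Nat.div_lt_self (Nat.pos_of_ne_zero (by omega)) (by norm_num)

lemma shiftRight3_lt (lab : Nat) (h : lab ≠ 0) : lab >>> 3 < lab := by
  simp only [Nat.shiftRight_eq_div_pow]
  exact Nat.div_lt_self (Nat.pos_of_ne_zero h) (by norm_num)

lemma dchan_pos (j off : Nat) (h : j ≠ 0) :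
    dchan j off = (((j >>> off) &&& 1) <<< 7) ||| (dchan (j >>> 3) off >>> 1) := by
  rw [dchan]; rw [if_neg h]

lemma dchan_zero (off : Nat) : dchan 0 off = 0 := by rw [dchan]; simp

-- intermediate list used by both sides: channel values of indices 0..m-1, interleaved
def BL (m : Nat) : List Int :=
  (List.range m).flatMap (fun j => [((dchan j 0 : Nat) : Int), ((dchan j 1 : Nat) : Int), ((dchan j 2 : Nat) : Int)])

--------------------------------------------------------------------------------
-- A-SIDE: the fold of vocStep produces BL
--------------------------------------------------------------------------------

-- A's while loop per channel, as a tail-recursive accumulator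
def WA (a : Int) (lab i off : Nat) : Int :=
  if h : lab ≠ 0 then
    WA (PySem.Int.bor a ((((lab >>> off) &&& 1) <<< (7 - i) : Nat) : Int)) (lab >>> 3) (i + 1) off
  else a
termination_by lab
decreasing_by
  simp only [Nat.shiftRight_eq_div_pow]
  exact Nat.div_lt_self (Nat.pos_of_ne_zero h) (by norm_num)

lemma WA_pos (a : Int) (lab i off : Nat) (h : lab ≠ 0) :
    WA a lab i off
      = WA (PySem.Int.bor a ((((lab >>> off) &&& 1) <<< (7 - i) : Nat) : Int)) (lab >>> 3) (i + 1) off := by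
  rw [WA]; rw [dif_pos h]

lemma WA_zero (a : Int) (i off : Nat) : WA a 0 i off = a := by
  rw [WA]; simp

lemma length_vocWhile (lab : Nat) : ∀ (pal : List Int) (j3 i : Nat),
    (vocWhile pal j3 lab i).length = pal.length := by
  induction lab using Nat.strong_induction_on with
  | _ lab ih =>
    intro pal j3 i
    rw [vocWhile]
    by_cases h : lab ≠ 0
    · simp only [dif_pos h]
      rw [ih _ (shiftRight3_lt _ h)]
      simp
    · simp only [dif_neg h]

lemma length_vocStep (pal : List Int) (j : Int) : (vocStep pal j).length = pal.length := by
  unfold vocStep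
  dsimp only
  rw [length_vocWhile]
  simp

-- the three writes of iteration j only touch the block [3j, 3j+3)
lemma vocWhile_append_right (t : List Int) (lab : Nat) :
    ∀ (pal : List Int) (j3 i : Nat), j3 + 3 ≤ pal.length →
    vocWhile (pal ++ t) j3 lab i = vocWhile pal j3 lab i ++ t := by
  induction lab using Nat.strong_induction_on with
  | _ lab ih =>
    intro pal j3 i hlen
    conv_lhs => rw [vocWhile]
    conv_rhs => rw [vocWhile]
    by_cases h : lab ≠ 0
    · simp only [dif_pos h]
      rw [List.getD_append _ _ _ _ (by omega),
          List.set_append, if_pos (by omega)]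
      rw [List.getD_append _ _ _ _ (by simp; omega),
          List.set_append, if_pos (by simp; omega)]
      rw [List.getD_append _ _ _ _ (by simp; omega),
          List.set_append, if_pos (by simp; omega)]
      rw [ih _ (shiftRight3_lt _ h) _ _ _ (by simp; omega)]
    · simp only [dif_neg h]

lemma vocStep_append (t pal : List Int) (j : Int) (_hj : 0 ≤ j)
    (hlen : (j * 3).toNat + 3 ≤ pal.length) :
    vocStep (pal ++ t) j = vocStep pal j ++ t := by
  unfold vocStep
  dsimp only
  rw [List.set_append, if_pos (by omega),
      List.set_append, if_pos (by simp; omega),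
      List.set_append, if_pos (by simp; omega)]
  rw [vocWhile_append_right _ _ _ _ _ (by simp; omega)]

lemma foldl_vocStep_len (l : List Int) : ∀ pal : List Int,
    (List.foldl vocStep pal l).length = pal.length := by
  induction l with
  | nil => intro pal; rfl
  | cons x xs ih => intro pal; simp only [List.foldl_cons, ih, length_vocStep]

lemma foldl_vocStep_append (t : List Int) (m : Nat) :
    ∀ pal : List Int, 3 * m ≤ pal.length →
    List.foldl vocStep (pal ++ t) ((List.range m).map (fun (k : Nat) => (k : Int)))
      = List.foldl vocStep pal ((List.range m).map (fun (k : Nat) => (k : Int))) ++ t := by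
  induction m with
  | zero => intro pal _; simp
  | succ m ih =>
    intro pal hlen
    rw [List.range_succ, List.map_append, List.map_singleton,
        List.foldl_append, List.foldl_append]
    rw [ih pal (by omega)]
    simp only [List.foldl_cons, List.foldl_nil]
    exact vocStep_append _ _ _ (by positivity) (by rw [foldl_vocStep_len]; omega)

lemma get_blk (X : List Int) (ys : List Int) (k : Nat) :
    (X ++ ys).getD (X.length + k) 0 = ys.getD k 0 := by
  rw [List.getD_append_right _ _ _ _ (by omega)]
  congr 1
  omega

lemma set_blk (X : List Int) (ys : List Int) (k : Nat) (v : Int) :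
    (X ++ ys).set (X.length + k) v = X ++ ys.set k v := by
  rw [List.set_append, if_neg (by omega)]
  congr 2
  omega

-- A's while loop on the block [a,b,c] at the end of the list
lemma vocWhile_set3 (lab : Nat) : ∀ (X : List Int) (a b c : Int) (i : Nat),
    vocWhile (X ++ [a, b, c]) X.length lab i = X ++ [WA a lab i 0, WA b lab i 1, WA c lab i 2] := by
  induction lab using Nat.strong_induction_on with
  | _ lab ih =>
    intro X a b c i
    conv_lhs => rw [vocWhile]
    by_cases h : lab ≠ 0
    · simp only [dif_pos h]
      rw [get_blk, set_blk, get_blk, set_blk, get_blk, set_blk]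
      simp only [List.getD_cons_zero, List.getD_cons_succ, List.set_cons_zero,
        List.set_cons_succ]
      rw [ih _ (shiftRight3_lt _ h)]
      rw [WA_pos _ _ _ 0 h, WA_pos _ _ _ 1 h, WA_pos _ _ _ 2 h]
    · simp only [dif_neg h]
      have h0 : lab = 0 := by omega
      subst h0
      rw [WA_zero, WA_zero, WA_zero]

lemma shiftLeft7_shiftRight (b i : Nat) (h : i ≤ 7) : (b <<< 7) >>> i = b <<< (7 - i) := by
  rw [Nat.shiftLeft_eq, Nat.shiftLeft_eq, Nat.shiftRight_eq_div_pow,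
      show (7:Nat) = (7 - i) + i by omega, pow_add, ← mul_assoc, Nat.add_sub_cancel]
  exact Nat.mul_div_cancel _ (Nat.two_pow_pos i)

-- A's accumulator loop computes dchan, shifted by the slot already consumed
lemma WA_eq_dchan_aux (j : Nat) : ∀ (i off : Nat), j < 2 ^ (3 * (8 - i)) → ∀ a : Nat,
    WA (a : Int) j i off = (((a ||| (dchan j off >>> i)) : Nat) : Int) := by
  induction j using Nat.strong_induction_on with
  | _ j ih =>
    intro i off hj a
    by_cases h : j = 0
    · subst h
      rw [WA_zero, dchan_zero, Nat.zero_shiftRight, Nat.or_zero]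
    · have hi7 : i ≤ 7 := by
        by_contra hc
        have h8 : 8 - i = 0 := by omega
        rw [h8] at hj
        simp at hj
        omega
      rw [WA_pos _ _ _ _ h, PySem.Int.bor_natCast]
      have hj3 : j >>> 3 < 2 ^ (3 * (8 - (i + 1))) := by
        rw [Nat.shiftRight_eq_div_pow]
        have he : 3 * (8 - i) = 3 * (8 - (i + 1)) + 3 := by omega
        rw [he, pow_add] at hj
        omega
      rw [ih _ (shiftRight3_lt _ h) (i + 1) off hj3]
      congr 1
      rw [dchan_pos _ _ h, Nat.shiftRight_or_distrib,
          shiftLeft7_shiftRight _ _ hi7, Nat.or_assoc,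
          ← Nat.shiftRight_add, Nat.add_comm 1 i]

lemma WA_eq_dchan (j off : Nat) (hj : j < 2 ^ 24) : WA 0 j 0 off = ((dchan j off : Nat) : Int) := by
  have := WA_eq_dchan_aux j 0 off (by norm_num; omega) 0
  simpa using this

lemma length_BL (m : Nat) : (BL m).length = 3 * m := by
  induction m with
  | zero => rfl
  | succ m ih => simp [BL, List.range_succ] at ih ⊢; omega

lemma BL_succ (m : Nat) :
    BL (m + 1) = BL m ++ [((dchan m 0 : Nat) : Int), ((dchan m 1 : Nat) : Int), ((dchan m 2 : Nat) : Int)] := by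
  simp [BL, List.range_succ]

lemma main_loop (m : Nat) (hm : m ≤ 2 ^ 24) :
    List.foldl vocStep (List.replicate (3 * m) (0 : Int)) ((List.range m).map (fun (k : Nat) => (k : Int)))
      = BL m := by
  induction m with
  | zero => rfl
  | succ m ih =>
    have hrep : List.replicate (3 * (m + 1)) (0 : Int)
        = List.replicate (3 * m) 0 ++ [0, 0, 0] := by
      have : 3 * (m + 1) = 3 * m + 3 := by ring
      rw [this, List.replicate_add]
      rfl
    rw [hrep, List.range_succ, List.map_append, List.map_singleton,
        List.foldl_append]
    rw [foldl_vocStep_append _ _ _ (by simp)]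
    rw [ih (by omega)]
    simp only [List.foldl_cons, List.foldl_nil]
    rw [BL_succ]
    unfold vocStep
    dsimp only
    have hj3 : ((m : Int) * 3).toNat = 3 * m := by omega
    have hlen : (BL m).length = 3 * m := length_BL m
    rw [hj3]
    have hset : (((BL m ++ [0, 0, 0]).set (3 * m + 0) 0).set (3 * m + 1) 0).set (3 * m + 2) (0 : Int)
        = BL m ++ [0, 0, 0] := by
      rw [List.set_append, if_neg (by omega)]
      simp only [hlen, Nat.add_sub_cancel_left]
      rw [List.set_append, if_neg (by simp [hlen])]
      simp only [hlen, Nat.add_sub_cancel_left]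
      rw [List.set_append, if_neg (by simp [hlen])]
      simp only [hlen, Nat.add_sub_cancel_left]
      rfl
    rw [hset]
    have h3m : 3 * m = (BL m).length := hlen.symm
    rw [h3m, vocWhile_set3]
    have hm' : m < 2 ^ 24 := by omega
    simp [Int.toNat_natCast, WA_eq_dchan _ _ hm']

--------------------------------------------------------------------------------
-- B-SIDE: the DP fold fills each channel table with dchan
--------------------------------------------------------------------------------

-- channel table after the entries 1..k have been filled (entry 0 stays 0 = dchan 0 off)
def Tab (off k m : Nat) : List Int :=
  (List.range m).map (fun x => if x ≤ k then ((dchan x off : Nat) : Int) else 0)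

lemma Tab_zero (off m : Nat) : Tab off 0 m = List.replicate m 0 := by
  unfold Tab
  rw [List.eq_replicate_iff]
  constructor
  · simp
  · intro b hb
    rw [List.mem_map] at hb
    obtain ⟨x, _, hx⟩ := hb
    by_cases h : x ≤ 0
    · have h0 : x = 0 := by omega
      rw [← hx, if_pos h, h0, dchan_zero]
      rfl
    · rw [← hx, if_neg h]

lemma map_range_set (j : Nat) (v : Int) (f : Nat → Int) (m : Nat) (hj : j < m) :
    ((List.range m).map f).set j v = (List.range m).map (fun x => if x = j then v else f x) := by
  apply List.ext_getElem
  · simp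
  · intro i h1 h2
    rw [List.getElem_set]
    simp only [List.getElem_map, List.getElem_range]
    by_cases h : j = i
    · subst h; simp
    · rw [if_neg h, if_neg (fun e => h e.symm)]

-- one DP update on a correctly-filled table extends it by one entry
lemma updC_Tab (off k m : Nat) (hk : k + 1 < m) :
    updC off (Tab off k m) ((k + 1 : Nat) : Int) = Tab off (k + 1) m := by
  unfold updC Tab
  have htn : (((k + 1 : Nat) : Int)).toNat = k + 1 := by omega
  rw [htn]
  have hq1 : (k + 1) >>> 3 ≤ k := by
    rw [Nat.shiftRight_eq_div_pow]
    omega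
  have hqm : (k + 1) >>> 3 < m := lt_of_le_of_lt (le_trans hq1 (Nat.le_succ k)) hk
  have hget : ((List.range m).map (fun x => if x ≤ k then ((dchan x off : Nat) : Int) else 0)).getD ((k + 1) >>> 3) 0
      = ((dchan ((k + 1) >>> 3) off : Nat) : Int) := by
    rw [PySem.List.getD_map_range _ _ _ _ hqm]
    rw [if_pos hq1]
  rw [hget]
  have hcast : (((dchan ((k + 1) >>> 3) off : Nat) : Int) >>> 1)
      = (((dchan ((k + 1) >>> 3) off >>> 1 : Nat)) : Int) := rfl
  rw [hcast, PySem.Int.bor_natCast]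
  rw [map_range_set _ _ _ _ hk]
  apply List.map_congr_left
  intro x _
  by_cases hx : x = k + 1
  · subst hx
    rw [if_pos rfl, if_pos (by omega)]
    congr 1
    rw [dchan_pos (k + 1) off (Nat.succ_ne_zero k)]
  · rw [if_neg hx]
    by_cases hx2 : x ≤ k
    · rw [if_pos hx2, if_pos (by omega)]
    · rw [if_neg hx2, if_neg (by omega)]

-- a fold whose step acts componentwise is the triple of the component folds
lemma foldl_componentwise (l : List Int) :
    ∀ (a b c : List Int),
    l.foldl altStep (a, b, c) = (l.foldl (updC 0) a, l.foldl (updC 1) b, l.foldl (updC 2) c) := by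
  induction l with
  | nil => intro a b c; rfl
  | cons x xs ih => intro a b c; simp only [List.foldl_cons, altStep, ih]

-- the whole DP loop for one channel
lemma foldl_updC (off m : Nat) : ∀ k, k < m →
    List.foldl (updC off) (List.replicate m 0) ((List.range k).map (fun t => ((1 + t : Nat) : Int)))
      = Tab off k m := by
  intro k
  induction k with
  | zero => intro _; simp [Tab_zero]
  | succ k ih =>
    intro hk
    rw [List.range_succ, List.map_append, List.map_singleton, List.foldl_append,
        ih (by omega)]
    simp only [List.foldl_cons, List.foldl_nil]
    have h1k : (1 + k) = k + 1 := by omega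
    rw [h1k]
    exact updC_Tab off k m hk

lemma getD_Tab (off k m x : Nat) (hx : x < m) (hxk : x ≤ k) :
    (Tab off k m).getD x 0 = ((dchan x off : Nat) : Int) := by
  unfold Tab
  rw [PySem.List.getD_map_range _ _ _ _ hx, if_pos hxk]

lemma pyRange_nil_of_nonpos (a n : Int) (hn : n ≤ a) : PySem.List.pyRange a n 1 = [] :=
  PySem.List.pyRange_one_eq_nil hn

lemma alt_eq_BL (n : Int) : get_voc_palette_alt n = BL n.toNat := by
  unfold get_voc_palette_alt
  dsimp only
  by_cases hn : 1 ≤ n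
  · set m := n.toNat with hm
    have hm1 : 1 ≤ m := by omega
    have hr : PySem.List.pyRange 1 n 1 = (List.range (m - 1)).map (fun t => ((1 + t : Nat) : Int)) := by
      rw [PySem.List.pyRange_one]
      have : (n - 1).toNat = m - 1 := by omega
      rw [this]
      apply List.map_congr_left
      intro t _
      push_cast
      ring
    have h0 : PySem.List.pyRange 0 n 1 = (List.range m).map (fun (k : Nat) => (k : Int)) := by
      have hc : n = ((m : Nat) : Int) := by omega
      rw [hc, PySem.List.pyRange_zero_natCast]
    rw [hr, h0, foldl_componentwise,
        foldl_updC 0 m (m - 1) (by omega), foldl_updC 1 m (m - 1) (by omega),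
        foldl_updC 2 m (m - 1) (by omega)]
    unfold BL
    rw [List.flatMap_map]
    apply List.flatMap_congr
    intro j hj
    rw [List.mem_range] at hj
    have htn : (((j : Nat) : Int)).toNat = j := by omega
    simp only [htn]
    rw [getD_Tab 0 (m - 1) m j hj (by omega), getD_Tab 1 (m - 1) m j hj (by omega),
        getD_Tab 2 (m - 1) m j hj (by omega)]
  · rw [pyRange_nil_of_nonpos 1 n (by omega), pyRange_nil_of_nonpos 0 n (by omega)]
    have h0 : n.toNat = 0 := by omega
    simp [h0, BL]

-- ===== VERDICT (by name: the statement is the Claim_ definition above) =====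
theorem get_voc_palette_spec : Claim_equal_get_voc_palette := by
  intro n _ hPre
  unfold Spec_get_voc_palette
  rw [alt_eq_BL]
  unfold get_voc_palette
  by_cases hn : 0 ≤ n
  · have hcast : n = ((n.toNat : Nat) : Int) := by omega
    rw [hcast, PySem.List.pyRange_zero_natCast]
    have h3 : ((((n.toNat : Nat) : Int)) * 3).toNat = 3 * n.toNat := by omega
    rw [h3]
    exact main_loop n.toNat (by unfold Pre_get_voc_palette at hPre; omega)
  · rw [pyRange_nil_of_nonpos 0 n (by omega)]
    have h0 : (n * 3).toNat = 0 := by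
      have : n * 3 ≤ 0 := by omega
      omega
    have ht : n.toNat = 0 := by omega
    simp [h0, ht, BL]
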